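-- pv_equiv track=rewrite | github.com/yubinbai/Codejam | round1B 2008/numberSet/main2.py | solve
-- ===== SOURCE A (Python) =====
-- def solve(A, B, P):
--     # find the prime numbers
--     primes = getPrimes(1000000)
--     # make disjoint set
--     parent = []
--     for i in range(B - A + 1):
--         parent.append(i)
--     rank = [0] * (B - A + 1)
--
--     def find(i):
--         if parent[i] != i:
--             parent[i] = find(parent[i])
--         return parent[i]
--
--     def union(i, j):
--         p1 = i
--         while parent[p1] != p1:
--             p1 = parent[p1]
--         p2 = j
--         while parent[p2] != p2:
--             p2 = parent[p2]
--         if rank[p1] < rank[p2]: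
--             parent[p1] = p2
--         else:
--             parent[p2] = p1
--             if rank[p1] == rank[p2]:
--                 rank[p1] += 1
--
--     # sieve to get all sets
--     result = B - A + 1
--     for p in primes:
--         if p >= (B - A + 1):
--             break
--         if p >= P:
--             x = (A // p) * p
--             if x < A:
--                 x += p
--             x -= A
--             for y in range(x, B - A + 1, p):
--                 if find(x) != find(y):
--                     result -= 1
--                     union(x, y)
--
--     return '%d' % result
--
-- def getPrimes(N):
--     sieve = [True] * (N + 1)
--     sieve[0] = sieve[1] = False
--     results = []
--     for i in range(2, N):
--         if sieve[i] == True: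
--             results.append(i)
--             for j in range(i * 2, N, i):
--                 sieve[j] = False
--     return results
-- ===== SOURCE B (Python) =====
-- def getPrimes(N):
--     sieve = [True] * (N + 1)
--     sieve[0] = sieve[1] = False
--     results = []
--     for i in range(2, N):
--         if sieve[i] == True:
--             results.append(i)
--             for j in range(i * 2, N, i):
--                 sieve[j] = False
--     return results
--
-- def solve(A, B, P):
--     primes = getPrimes(1000000)
--     n = B - A + 1
--     comp = list(range(n))
--     members = {}
--     result = n
--     for p in primes:
--         if p >= n:
--             break
--         if p >= P:
--             x = (A // p) * p
--             if x < A: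
--                 x += p
--             x -= A
--             cx = comp[x]
--             for y in range(x + p, n, p):
--                 cy = comp[y]
--                 if cy != cx:
--                     result -= 1
--                     mx = members[cx] if cx in members else [cx]
--                     my = members[cy] if cy in members else [cy]
--                     if len(mx) < len(my):
--                         cx, cy = cy, cx
--                         mx, my = my, mx
--                     for idx in my:
--                         comp[idx] = cx
--                     mx.extend(my)
--                     members[cx] = mx
--                     if cy in members:
--                         del members[cy]
--     return '%d' % result
-- ===== Notes on version B (the rewrite author's own statement) =====
-- stated objective: alternative
-- what changed: Replaces the union-find (recursive find with path compression, while-loop root climbing, union by rank) by flat label propagation: comp[i] holds a component label, a dict keeps each label's member list, and a merge relabels the smaller component's members ('relabel the smaller half') instead of linking trees.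
import Mathlib
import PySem

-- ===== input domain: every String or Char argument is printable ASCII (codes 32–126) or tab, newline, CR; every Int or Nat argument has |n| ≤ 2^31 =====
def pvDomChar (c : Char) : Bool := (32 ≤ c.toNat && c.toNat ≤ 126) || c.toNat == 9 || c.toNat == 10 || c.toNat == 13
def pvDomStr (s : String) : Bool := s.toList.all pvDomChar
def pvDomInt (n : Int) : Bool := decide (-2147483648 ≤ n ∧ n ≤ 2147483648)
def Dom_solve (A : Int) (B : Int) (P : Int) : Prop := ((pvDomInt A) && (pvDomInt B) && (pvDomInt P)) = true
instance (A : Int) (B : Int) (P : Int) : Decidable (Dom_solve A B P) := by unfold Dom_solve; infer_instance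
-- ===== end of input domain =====

-- B replaces A's union-find (recursive find with path compression, while-loop
-- root climbing, union by rank) with a flat label-propagation scheme (one label
-- list; a merge rewrites one label into the other); objective: simpler.

-- ===== PORT A =====
-- shared module helper getPrimes (both Pythons call the identical sieve).
-- Python list indices/assignments here are always in range, so Array.getD/set!
-- and index .toNat (indices are provably nonnegative) are exact.
def getPrimesStep (N : Int) (st : Array Bool × Array Int) (i : Int) : Array Bool × Array Int :=
  if st.1.getD i.toNat false = true then
    ((PySem.List.pyRange (i * 2) N i).foldl (fun sv j => sv.set! j.toNat false) st.1,
     st.2.push i)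
  else st

def getPrimes (N : Int) : List Int :=
  let sieve := ((Array.replicate (N + 1).toNat true).set! 0 false).set! 1 false
  ((PySem.List.pyRange 2 N 1).foldl (getPrimesStep N) (sieve, #[])).2.toList

-- find(i) with path compression; fuel = len(parent) (proved sufficient: the
-- parent array is always a forest, see findF_spec below)
def findF : Nat → Array Int → Nat → Array Int × Int
  | 0, par, i => (par, (i : Int))
  | f + 1, par, i =>
    let pi := par.getD i 0
    if pi = (i : Int) then (par, (i : Int))
    else
      let r := findF f par pi.toNat
      (r.1.set! i r.2, r.2)

-- the 'while parent[p] != p' climb inside union; fuel likewise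
def climbF : Nat → Array Int → Nat → Nat
  | 0, _, i => i
  | f + 1, par, i =>
    let pi := par.getD i 0
    if pi = (i : Int) then i else climbF f par pi.toNat

def unionF (par rank : Array Int) (i j : Nat) : Array Int × Array Int :=
  let p1 := climbF par.size par i
  let p2 := climbF par.size par j
  if rank.getD p1 0 < rank.getD p2 0 then (par.set! p1 (p2 : Int), rank)
  else
    let par' := par.set! p2 (p1 : Int)
    if rank.getD p1 0 = rank.getD p2 0 then (par', rank.set! p1 (rank.getD p1 0 + 1))
    else (par', rank)

-- 'for y in range(x, B-A+1, p)'
def aInner (x : Int) : List Int → Array Int × Array Int × Int → Array Int × Array Int × Int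
  | [], st => st
  | y :: ys, st =>
    let fx := findF st.1.size st.1 x.toNat
    let fy := findF fx.1.size fx.1 y.toNat
    if fx.2 ≠ fy.2 then
      let u := unionF fy.1 st.2.1 x.toNat y.toNat
      aInner x ys (u.1, u.2, st.2.2 - 1)
    else aInner x ys (fy.1, st.2.1, st.2.2)

-- 'for p in primes' with the break
def aPrimes (Av P n : Int) : List Int → Array Int × Array Int × Int → Array Int × Array Int × Int
  | [], st => st
  | p :: ps, st =>
    if p ≥ n then st
    else if p ≥ P then
      let x0 := PySem.Int.floordiv Av p * p
      let x1 := if x0 < Av then x0 + p else x0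
      let x := x1 - Av
      aPrimes Av P n ps (aInner x (PySem.List.pyRange x n p) st)
    else aPrimes Av P n ps st

def solve (A : Int) (B : Int) (P : Int) : String :=
  let primes := getPrimes 1000000
  let n := B - A + 1
  let parent := ((List.range n.toNat).map (fun i => Int.ofNat i)).toArray
  let rank := Array.replicate n.toNat (0 : Int)
  let st := aPrimes A P n primes (parent, rank, n)
  PySem.Int.toStr st.2.2

-- ===== PORT B =====
-- members[l] if present, else the implicit singleton class [l]
def bGet (members : PySem.Dict Int (List Int)) (l : Int) : List Int :=
  match members.get? l with
  | some m => m
  | none => [l]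

-- 'for y in range(x+p, n, p)'; state = (cx, comp, members, result).
-- 'del members[cy]' is guarded by 'cy in members' in the Python, so Dict.erase
-- (a no-op on a missing key) is exact.
def bInner : List Int → Int × List Int × PySem.Dict Int (List Int) × Int →
    Int × List Int × PySem.Dict Int (List Int) × Int
  | [], st => st
  | y :: ys, st =>
    let cy := st.2.1.getD y.toNat 0
    if cy ≠ st.1 then
      let mx := bGet st.2.2.1 st.1
      let my := bGet st.2.2.1 cy
      let w := if mx.length < my.length then cy else st.1
      let l := if mx.length < my.length then st.1 else cy
      let mw := if mx.length < my.length then my else mx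
      let ml := if mx.length < my.length then mx else my
      bInner ys (w, ml.foldl (fun c idx => c.set idx.toNat w) st.2.1,
        (st.2.2.1.insert w (mw ++ ml)).erase l, st.2.2.2 - 1)
    else bInner ys st

def bPrimes (Av P n : Int) : List Int → List Int × PySem.Dict Int (List Int) × Int →
    List Int × PySem.Dict Int (List Int) × Int
  | [], st => st
  | p :: ps, st =>
    if p ≥ n then st
    else if p ≥ P then
      let x0 := PySem.Int.floordiv Av p * p
      let x1 := if x0 < Av then x0 + p else x0
      let x := x1 - Av
      bPrimes Av P n ps (bInner (PySem.List.pyRange (x + p) n p) (st.1.getD x.toNat 0, st)).2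
    else bPrimes Av P n ps st

def solve_alt (A : Int) (B : Int) (P : Int) : String :=
  let primes := getPrimes 1000000
  let n := B - A + 1
  let comp := (List.range n.toNat).map (fun i => Int.ofNat i)
  let st := bPrimes A P n primes (comp, PySem.Dict.empty, n)
  PySem.Int.toStr st.2.2

-- ===== PRECONDITION & SPEC =====
def Spec_solve (A : Int) (B : Int) (P : Int) (out : String) : Prop := out = solve_alt A B P
instance (A : Int) (B : Int) (P : Int) (out : String) : Decidable (Spec_solve A B P out) := by unfold Spec_solve; infer_instance

-- ===== CLAIM (what is proved, stated in full; the proofs are below) =====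
def Claim_equal_solve : Prop := ∀ (A : Int) (B : Int) (P : Int), Dom_solve A B P → Spec_solve A B P (solve A B P)

-- ===== LEMMAS AND PROOFS =====

-- the parent pointer as a Nat → Nat step function, and roots
def pstep (par : Array Int) (i : Nat) : Nat := (par.getD i 0).toNat
def IsRootP (par : Array Int) (i : Nat) : Prop := par.getD i 0 = (i : Int)
def rootp (par : Array Int) (i : Nat) : Nat := (pstep par)^[par.size] i
-- the forest invariant: entries are in-range indices and every chain reaches a root
def GoodPar (par : Array Int) : Prop :=
  (∀ i, i < par.size → 0 ≤ par.getD i 0 ∧ (par.getD i 0).toNat < par.size) ∧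
  (∀ i, i < par.size → ∃ k, IsRootP par ((pstep par)^[k] i))

lemma pget_set (a : Array Int) (i j : Nat) (v d : Int) (hi : i < a.size) :
    (a.set! i v).getD j d = if j = i then v else a.getD j d := by
  by_cases h : j = i <;>
    simp [Array.set!, Array.getD_eq_getD_getElem?, h, hi,
      eq_comm (a := i) (b := j)]

lemma pstep_root {par : Array Int} {i : Nat} (h : IsRootP par i) : pstep par i = i := by
  unfold pstep; unfold IsRootP at h; rw [h]; exact Int.toNat_natCast i

lemma iter_root {par : Array Int} {i : Nat} (h : IsRootP par i) (k : Nat) :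
    (pstep par)^[k] i = i := Function.iterate_fixed (pstep_root h) k

lemma iter_stable {par : Array Int} {i k : Nat}
    (hk : IsRootP par ((pstep par)^[k] i)) {f : Nat} (hf : k ≤ f) :
    (pstep par)^[f] i = (pstep par)^[k] i := by
  obtain ⟨t, rfl⟩ : ∃ t, f = t + k := ⟨f - k, by omega⟩
  rw [Function.iterate_add_apply]; exact iter_root hk t

lemma pstep_lt {par : Array Int} (hG : GoodPar par) {i : Nat} (hi : i < par.size) :
    pstep par i < par.size := (hG.1 i hi).2

lemma iter_lt {par : Array Int} (hG : GoodPar par) {i : Nat} (hi : i < par.size) (k : Nat) :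
    (pstep par)^[k] i < par.size := by
  induction k with
  | zero => simpa using hi
  | succ k ih => rw [Function.iterate_succ_apply']; exact pstep_lt hG ih

-- pigeonhole: a chain that reaches a root reaches it within par.size steps
lemma reach_small {par : Array Int} (hG : GoodPar par) {i : Nat} (hi : i < par.size) :
    ∃ k, k < par.size ∧ IsRootP par ((pstep par)^[k] i) := by
  letI : DecidablePred (fun n => IsRootP par ((pstep par)^[n] i)) := by
    intro n; unfold IsRootP; infer_instance
  have hex := hG.2 i hi
  have hK : IsRootP par ((pstep par)^[Nat.find hex] i) := Nat.find_spec hex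
  by_cases hlt : Nat.find hex < par.size
  · exact ⟨Nat.find hex, hlt, hK⟩
  exfalso
  push_neg at hlt
  have key : ∀ a b : Nat, a < b → b ≤ par.size → (pstep par)^[a] i = (pstep par)^[b] i → False := by
    intro a b hab hb heq
    have hshift : ∀ t, (pstep par)^[a + t] i = (pstep par)^[b + t] i := by
      intro t
      rw [Nat.add_comm a t, Function.iterate_add_apply, heq, ← Function.iterate_add_apply,
        Nat.add_comm t b]
    have h1 : IsRootP par ((pstep par)^[a + (Nat.find hex - b)] i) := by
      rw [hshift]
      have hb' : b + (Nat.find hex - b) = Nat.find hex := by omega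
      rw [hb']; exact hK
    exact Nat.find_min hex (by omega) h1
  have hmap : ∃ x ∈ Finset.range (par.size + 1), ∃ y ∈ Finset.range (par.size + 1),
      x ≠ y ∧ (pstep par)^[x] i = (pstep par)^[y] i := by
    apply Finset.exists_ne_map_eq_of_card_lt_of_maps_to (t := Finset.range par.size)
    · simp
    · intro t _; simp only [Finset.coe_range, Set.mem_Iio]
      exact iter_lt hG hi t
  obtain ⟨a, ha, b, hb, hne, heq⟩ := hmap
  simp only [Finset.mem_range] at ha hb
  rcases Nat.lt_or_ge a b with h | h
  · exact key a b h (by omega) heq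
  · exact key b a (by omega) (by omega) heq.symm

lemma rootp_isRoot {par : Array Int} (hG : GoodPar par) {i : Nat} (hi : i < par.size) :
    IsRootP par (rootp par i) := by
  obtain ⟨k, hk, hr⟩ := reach_small hG hi
  unfold rootp; rw [iter_stable hr (by omega)]; exact hr

lemma rootp_lt {par : Array Int} (hG : GoodPar par) {i : Nat} (hi : i < par.size) :
    rootp par i < par.size := iter_lt hG hi _

lemma rootp_eq_of_reach {par : Array Int} {i k : Nat}
    (hk : IsRootP par ((pstep par)^[k] i)) (hks : k ≤ par.size) :
    rootp par i = (pstep par)^[k] i := iter_stable hk hks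

lemma rootp_of_root {par : Array Int} {i : Nat} (h : IsRootP par i) : rootp par i = i :=
  iter_root h _

lemma rootp_step {par : Array Int} (hG : GoodPar par) {i : Nat} (hi : i < par.size)
    (hnr : ¬ IsRootP par i) : rootp par i = rootp par (pstep par i) := by
  obtain ⟨t, ht⟩ : ∃ t, par.size = t + 1 := ⟨par.size - 1, by omega⟩
  obtain ⟨k, hk, hr⟩ := reach_small hG (pstep_lt hG hi)
  have h1 : rootp par i = (pstep par)^[t] (pstep par i) := by
    unfold rootp; rw [ht, Function.iterate_succ_apply]
  rw [h1, iter_stable hr (by omega), rootp_eq_of_reach hr (by omega)]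

lemma pstep_set (a : Array Int) (i r : Nat) (hi : i < a.size) (j : Nat) :
    pstep (a.set! i (r : Int)) j = if j = i then r else pstep a j := by
  unfold pstep; rw [pget_set _ _ _ _ _ hi]; by_cases h : j = i <;> simp [h]

lemma isRoot_set (a : Array Int) (i r : Nat) (hi : i < a.size) (j : Nat) :
    IsRootP (a.set! i (r : Int)) j ↔ (if j = i then r = j else IsRootP a j) := by
  unfold IsRootP; rw [pget_set _ _ _ _ _ hi]; by_cases h : j = i <;> simp [h]

-- effect of a single parent-link write when the start node is itself a root
lemma set_root_aux_rootj (par : Array Int) (i r : Nat)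
    (hG : GoodPar par) (hi : i < par.size) (hroot : IsRootP par r)
    (hcase : rootp par i = r ∨ IsRootP par i)
    (j : Nat) (hj : j < par.size) (hrj : IsRootP par j) :
    ∃ k', k' ≤ 1 ∧ IsRootP (par.set! i (r : Int)) ((pstep (par.set! i (r : Int)))^[k'] j) ∧
      (pstep (par.set! i (r : Int)))^[k'] j = (if rootp par j = rootp par i then r else rootp par j) := by
  have hrpj : rootp par j = j := rootp_of_root hrj
  by_cases hji : j = i
  · subst hji
    by_cases hri : r = j
    · refine ⟨0, by omega, ?_, ?_⟩
      · simp only [Function.iterate_zero, id_eq]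
        rw [isRoot_set _ _ _ hi, if_pos rfl]; exact hri
      · simp only [Function.iterate_zero, id_eq, if_true]; omega
    · have hs : pstep (par.set! j (r : Int)) j = r := by rw [pstep_set _ _ _ hi]; simp
      refine ⟨1, by omega, ?_, ?_⟩
      · rw [Function.iterate_one, hs, isRoot_set _ _ _ hi, if_neg hri]; exact hroot
      · rw [Function.iterate_one, hs, if_pos rfl]
  · refine ⟨0, by omega, ?_, ?_⟩
    · simp only [Function.iterate_zero, id_eq]
      rw [isRoot_set _ _ _ hi, if_neg hji]; exact hrj
    · simp only [Function.iterate_zero, id_eq]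
      rcases hcase with hc | hc
      · split_ifs with hcond <;> omega
      · have hri : rootp par i = i := rootp_of_root hc
        split_ifs with hcond <;> omega

-- effect of a single parent-link write on all roots
lemma set_root_aux (par : Array Int) (i r : Nat)
    (hG : GoodPar par) (hi : i < par.size) (hroot : IsRootP par r)
    (hcase : rootp par i = r ∨ IsRootP par i) :
    ∀ (k : Nat) (j : Nat), j < par.size → IsRootP par ((pstep par)^[k] j) →
      ∃ k', k' ≤ k + 1 ∧ IsRootP (par.set! i (r : Int)) ((pstep (par.set! i (r : Int)))^[k'] j) ∧
        (pstep (par.set! i (r : Int)))^[k'] j = (if rootp par j = rootp par i then r else rootp par j) := by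
  intro k
  induction k with
  | zero =>
    intro j hj h0
    simp only [Function.iterate_zero, id_eq] at h0
    obtain ⟨k', hk', h1, h2⟩ := set_root_aux_rootj par i r hG hi hroot hcase j hj h0
    exact ⟨k', by omega, h1, h2⟩
  | succ k ih =>
    intro j hj hrootk
    by_cases hrj : IsRootP par j
    · obtain ⟨k', hk', h1, h2⟩ := set_root_aux_rootj par i r hG hi hroot hcase j hj hrj
      exact ⟨k', by omega, h1, h2⟩
    by_cases hji : j = i
    · subst hji
      rcases hcase with hc | hc
      · have hri : r ≠ j := by
          intro h; rw [h] at hroot; exact hrj hroot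
        have hs : pstep (par.set! j (r : Int)) j = r := by rw [pstep_set _ _ _ hi]; simp
        refine ⟨1, by omega, ?_, ?_⟩
        · rw [Function.iterate_one, hs, isRoot_set _ _ _ hi, if_neg hri]; exact hroot
        · rw [Function.iterate_one, hs, if_pos rfl]
      · exact absurd hc hrj
    · have hj' : pstep par j < par.size := pstep_lt hG hj
      have hshift : (pstep par)^[k + 1] j = (pstep par)^[k] (pstep par j) :=
        Function.iterate_succ_apply _ _ _
      obtain ⟨k'', hk'', hroot'', hval''⟩ := ih (pstep par j) hj'
        (by rw [hshift] at hrootk; exact hrootk)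
      refine ⟨k'' + 1, by omega, ?_, ?_⟩
      · have hs : pstep (par.set! i (r : Int)) j = pstep par j := by
          rw [pstep_set _ _ _ hi]; simp [hji]
        rw [Function.iterate_succ_apply, hs]; exact hroot''
      · have hs : pstep (par.set! i (r : Int)) j = pstep par j := by
          rw [pstep_set _ _ _ hi]; simp [hji]
        rw [Function.iterate_succ_apply, hs, hval'', rootp_step hG hj hrj]

lemma set_root (par : Array Int) (i r : Nat)
    (hG : GoodPar par) (hi : i < par.size) (hr : r < par.size) (hroot : IsRootP par r)
    (hcase : rootp par i = r ∨ IsRootP par i) :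
    (par.set! i (r : Int)).size = par.size ∧ GoodPar (par.set! i (r : Int)) ∧
    ∀ j, j < par.size → rootp (par.set! i (r : Int)) j =
      if rootp par j = rootp par i then r else rootp par j := by
  have hsz : (par.set! i (r : Int)).size = par.size := Array.size_set! par i _
  refine ⟨hsz, ⟨?_, ?_⟩, ?_⟩
  · intro j hjs
    rw [hsz] at hjs
    rw [pget_set _ _ _ _ _ hi, hsz]
    by_cases h : j = i
    · rw [if_pos h]
      exact ⟨Int.natCast_nonneg r, by rw [Int.toNat_natCast]; exact hr⟩
    · rw [if_neg h]; exact hG.1 j hjs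
  · intro j hjs
    rw [hsz] at hjs
    obtain ⟨k, hk, hkr⟩ := reach_small hG hjs
    obtain ⟨k', _, h1, _⟩ := set_root_aux par i r hG hi hroot hcase k j hjs hkr
    exact ⟨k', h1⟩
  · intro j hj
    obtain ⟨k, hk, hkr⟩ := reach_small hG hj
    obtain ⟨k', hk', h1, h2⟩ := set_root_aux par i r hG hi hroot hcase k j hj hkr
    rw [← h2]
    exact rootp_eq_of_reach h1 (by rw [Array.size_set!]; omega)

lemma findF_spec : ∀ (f : Nat) (par : Array Int) (i : Nat), GoodPar par → i < par.size →
    (∃ k, k < f ∧ IsRootP par ((pstep par)^[k] i)) →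
    (findF f par i).2 = ((rootp par i : Nat) : Int) ∧
    (findF f par i).1.size = par.size ∧
    GoodPar (findF f par i).1 ∧
    ∀ j, j < par.size → rootp (findF f par i).1 j = rootp par j := by
  intro f
  induction f with
  | zero =>
    intro par i _ _ hex
    obtain ⟨k, hk, _⟩ := hex
    omega
  | succ f ih =>
    intro par i hG hi hex
    simp only [findF]
    by_cases hroot : par.getD i 0 = (i : Int)
    · rw [if_pos hroot]
      exact ⟨by rw [rootp_of_root hroot], rfl, hG, fun j _ => rfl⟩
    · rw [if_neg hroot]
      have hi's : (par.getD i 0).toNat < par.size := pstep_lt hG hi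
      have hex' : ∃ k, k < f ∧ IsRootP par ((pstep par)^[k] (par.getD i 0).toNat) := by
        obtain ⟨k, hk, hkr⟩ := hex
        cases k with
        | zero => simp only [Function.iterate_zero, id_eq] at hkr; exact absurd hkr hroot
        | succ k =>
          refine ⟨k, by omega, ?_⟩
          rw [Function.iterate_succ_apply] at hkr
          exact hkr
      obtain ⟨hv, hsz1, hG1, hroots1⟩ := ih par (par.getD i 0).toNat hG hi's hex'
      have hstep : rootp par (par.getD i 0).toNat = rootp par i :=
        (rootp_step hG hi hroot).symm
      have hvr : (findF f par (par.getD i 0).toNat).2 = ((rootp par i : Nat) : Int) := by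
        rw [hv, hstep]
      have hi1 : i < (findF f par (par.getD i 0).toNat).1.size := by rw [hsz1]; exact hi
      have hris : rootp par i < par.size := rootp_lt hG hi
      have hroot1 : IsRootP (findF f par (par.getD i 0).toNat).1 (rootp par i) := by
        have h1 := rootp_isRoot hG1 (show rootp par i < (findF f par (par.getD i 0).toNat).1.size by
          rw [hsz1]; exact hris)
        have h2 : rootp (findF f par (par.getD i 0).toNat).1 (rootp par i) = rootp par i := by
          rw [hroots1 _ hris, rootp_of_root (rootp_isRoot hG hi)]
        rw [h2] at h1; exact h1
      have hcase1 : rootp (findF f par (par.getD i 0).toNat).1 i = rootp par i := hroots1 i hi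
      obtain ⟨hsz2, hG2, hroots2⟩ := set_root (findF f par (par.getD i 0).toNat).1 i (rootp par i)
        hG1 hi1 (by rw [hsz1]; exact hris) hroot1 (Or.inl hcase1)
      refine ⟨by simp only [hvr], ?_, ?_, ?_⟩
      · simp only [hvr]
        rw [hsz2, hsz1]
      · simp only [hvr]
        exact hG2
      · intro j hj
        simp only [hvr]
        rw [hroots2 j (by rw [hsz1]; exact hj), hcase1, hroots1 j hj]
        by_cases h : rootp par j = rootp par i <;> simp [h]

lemma climbF_eq_iter : ∀ (f : Nat) (par : Array Int) (i : Nat),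
    climbF f par i = (pstep par)^[f] i := by
  intro f
  induction f with
  | zero => intro par i; rfl
  | succ f ih =>
    intro par i
    simp only [climbF]
    by_cases h : par.getD i 0 = (i : Int)
    · rw [if_pos h, iter_root h]
    · rw [if_neg h, Function.iterate_succ_apply, ih]; rfl

lemma unionF_spec (par rank : Array Int) (i j : Nat) (hG : GoodPar par)
    (hi : i < par.size) (hj : j < par.size) (hne : rootp par i ≠ rootp par j) :
    (unionF par rank i j).1.size = par.size ∧ GoodPar (unionF par rank i j).1 ∧
    ∃ R, (R = rootp par i ∨ R = rootp par j) ∧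
      ∀ u, u < par.size → rootp (unionF par rank i j).1 u =
        if rootp par u = rootp par i ∨ rootp par u = rootp par j then R else rootp par u := by
  have hp1 : climbF par.size par i = rootp par i := climbF_eq_iter par.size par i
  have hp2 : climbF par.size par j = rootp par j := climbF_eq_iter par.size par j
  have hroot1 : IsRootP par (rootp par i) := rootp_isRoot hG hi
  have hroot2 : IsRootP par (rootp par j) := rootp_isRoot hG hj
  have hlt1 : rootp par i < par.size := rootp_lt hG hi
  have hlt2 : rootp par j < par.size := rootp_lt hG hj
  have hself1 : rootp par (rootp par i) = rootp par i := rootp_of_root hroot1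
  have hself2 : rootp par (rootp par j) = rootp par j := rootp_of_root hroot2
  simp only [unionF, hp1, hp2]
  split_ifs with hrk hrk2
  · obtain ⟨hsz, hGn, hroots⟩ :=
      set_root par (rootp par i) (rootp par j) hG hlt1 hlt2 hroot2 (Or.inr hroot1)
    refine ⟨hsz, hGn, rootp par j, Or.inr rfl, ?_⟩
    intro u hu
    rw [hroots u hu, hself1]
    by_cases h1 : rootp par u = rootp par i
    · rw [if_pos h1, if_pos (Or.inl h1)]
    · rw [if_neg h1]
      by_cases h2 : rootp par u = rootp par j
      · rw [if_pos (Or.inr h2)]; exact h2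
      · rw [if_neg (by tauto)]
  all_goals
    obtain ⟨hsz, hGn, hroots⟩ :=
      set_root par (rootp par j) (rootp par i) hG hlt2 hlt1 hroot1 (Or.inr hroot2)
    refine ⟨hsz, hGn, rootp par i, Or.inl rfl, ?_⟩
    intro u hu
    rw [hroots u hu, hself2]
    by_cases h2 : rootp par u = rootp par j
    · rw [if_pos h2, if_pos (Or.inr h2)]
    · rw [if_neg h2]
      by_cases h1 : rootp par u = rootp par i
      · rw [if_pos (Or.inl h1)]; exact h1
      · rw [if_neg (by tauto)]

-- list getD of a literal map, and the dictionary lemmas the B-side needs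
lemma dict_get?_erase (d : PySem.Dict Int (List Int)) (k k' : Int) :
    (d.erase k).get? k' = if k' = k then none else d.get? k' := by
  obtain ⟨items⟩ := d
  induction items with
  | nil => by_cases h : k' = k <;> simp [PySem.Dict.erase, PySem.Dict.get?, h]
  | cons p rest ih =>
    obtain ⟨pk, pv⟩ := p
    simp only [PySem.Dict.erase, List.filter_cons] at ih ⊢
    by_cases hp : pk = k
    · rw [if_neg (by simp [hp]), ih]
      by_cases h : k' = k
      · rw [if_pos h, if_pos h]
      · rw [if_neg h, if_neg h, PySem.Dict.get?_mk_cons, if_neg (by simp; omega)]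
    · rw [if_pos (by simp [hp])]
      by_cases hpk : pk = k'
      · rw [PySem.Dict.get?_mk_cons, if_pos (by simp [hpk]), if_neg (by omega),
          PySem.Dict.get?_mk_cons, if_pos (by simp [hpk])]
      · rw [PySem.Dict.get?_mk_cons, if_neg (by simp [hpk]), ih]
        by_cases h : k' = k
        · rw [if_pos h, if_pos h]
        · rw [if_neg h, if_neg h, PySem.Dict.get?_mk_cons, if_neg (by simp [hpk])]

-- the B-side bookkeeping invariant: comp labels are in-range original indices,
-- members lists exactly the indices carrying a label (absent key = singleton)
def BInv (comp : List Int) (members : PySem.Dict Int (List Int)) : Prop :=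
  (∀ u, u < comp.length → 0 ≤ comp.getD u 0 ∧ (comp.getD u 0).toNat < comp.length) ∧
  (∀ l lst, members.get? l = some lst →
    ∀ i ∈ lst, 0 ≤ i ∧ i.toNat < comp.length ∧ comp.getD i.toNat 0 = l) ∧
  (∀ u, u < comp.length → ∀ lst, members.get? (comp.getD u 0) = some lst → (u : Int) ∈ lst) ∧
  (∀ u, u < comp.length → members.get? (comp.getD u 0) = none → comp.getD u 0 = (u : Int))

lemma bGet_nonneg {comp : List Int} {members : PySem.Dict Int (List Int)}
    (hB : BInv comp members) {z : Nat} (hz : z < comp.length) :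
    ∀ i ∈ bGet members (comp.getD z 0), 0 ≤ i ∧ i.toNat < comp.length ∧
      comp.getD i.toNat 0 = comp.getD z 0 := by
  intro i hi
  unfold bGet at hi
  cases h : members.get? (comp.getD z 0) with
  | some lst => rw [h] at hi; exact hB.2.1 _ lst h i hi
  | none =>
    rw [h] at hi
    have hzz := hB.2.2.2 z hz h
    simp only [List.mem_singleton] at hi
    subst hi
    exact ⟨by rw [hzz]; exact Int.natCast_nonneg z, by rw [hzz, Int.toNat_natCast]; exact hz,
      by rw [hzz, Int.toNat_natCast]; exact hzz⟩

lemma bGet_mem {comp : List Int} {members : PySem.Dict Int (List Int)}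
    (hB : BInv comp members) {z : Nat} (hz : z < comp.length) :
    ∀ u, u < comp.length →
      ((u : Int) ∈ bGet members (comp.getD z 0) ↔ comp.getD u 0 = comp.getD z 0) := by
  intro u hu
  unfold bGet
  cases h : members.get? (comp.getD z 0) with
  | some lst =>
    constructor
    · intro hm
      exact (by have := hB.2.1 _ lst h _ hm; rw [Int.toNat_natCast] at this; exact this.2.2)
    · intro hc
      exact hB.2.2.1 u hu lst (by rw [hc]; exact h)
  | none =>
    have hzz := hB.2.2.2 z hz h
    simp only [List.mem_singleton]
    constructor
    · intro hm
      rw [← hm] at hzz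
      have : u = z := by omega
      rw [this]
    · intro hc
      have h2 := hB.2.2.2 u hu (by rw [hc]; exact h)
      omega

lemma fold_set_length : ∀ (lst : List Int) (comp : List Int) (w : Int),
    (lst.foldl (fun c idx => c.set idx.toNat w) comp).length = comp.length := by
  intro lst
  induction lst with
  | nil => intro comp w; rfl
  | cons i lst ih =>
    intro comp w
    rw [List.foldl_cons, ih, List.length_set]

lemma fold_set_getD : ∀ (lst : List Int) (comp : List Int) (w : Int),
    (∀ i ∈ lst, 0 ≤ i) → ∀ u, u < comp.length →
    (lst.foldl (fun c idx => c.set idx.toNat w) comp).getD u 0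
      = if (u : Int) ∈ lst then w else comp.getD u 0 := by
  intro lst
  induction lst with
  | nil => intro comp w _ u hu; simp
  | cons i lst ih =>
    intro comp w hpos u hu
    rw [List.foldl_cons,
      ih (comp.set i.toNat w) w (fun j hj => hpos j (List.mem_cons_of_mem _ hj)) u
        (by rw [List.length_set]; exact hu)]
    by_cases hmem : (u : Int) ∈ lst
    · rw [if_pos hmem, if_pos (List.mem_cons_of_mem _ hmem)]
    · rw [if_neg hmem]
      by_cases hui : (u : Int) = i
      · have hpi := hpos i (List.mem_cons_self ..)
        have hiu : i.toNat = u := by omega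
        rw [if_pos (List.mem_cons.mpr (Or.inl hui)), List.getD_eq_getElem?_getD,
          List.getElem?_set, if_pos hiu, if_pos (by rw [hiu]; exact hu)]
        rfl
      · rw [if_neg (by intro h; rcases List.mem_cons.mp h with h | h; exact hui h; exact hmem h),
          List.getD_eq_getElem?_getD, List.getElem?_set,
          if_neg (by intro h; exact hui (by have := hpos i (List.mem_cons_self ..); omega)),
          ← List.getD_eq_getElem?_getD]

-- relabelling the losing class: pointwise description of the new comp list
lemma comp_char {comp : List Int} {members : PySem.Dict Int (List Int)}
    (hB : BInv comp members) {z : Nat} (hz : z < comp.length) (w : Int) :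
    ∀ u, u < comp.length →
    ((bGet members (comp.getD z 0)).foldl (fun c idx => c.set idx.toNat w) comp).getD u 0
      = if comp.getD u 0 = comp.getD z 0 then w else comp.getD u 0 := by
  intro u hu
  rw [fold_set_getD _ comp w (fun i hi => (bGet_nonneg hB hz i hi).1) u hu]
  by_cases h : comp.getD u 0 = comp.getD z 0
  · rw [if_pos ((bGet_mem hB hz u hu).mpr h), if_pos h]
  · rw [if_neg (fun hm => h ((bGet_mem hB hz u hu).mp hm)), if_neg h]

-- merging preserves the bookkeeping invariant
lemma BInv_merge {comp : List Int} {members : PySem.Dict Int (List Int)}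
    (hB : BInv comp members) {zw zl : Nat} (hzw : zw < comp.length) (hzl : zl < comp.length)
    (hne : comp.getD zw 0 ≠ comp.getD zl 0) :
    BInv ((bGet members (comp.getD zl 0)).foldl (fun c idx => c.set idx.toNat (comp.getD zw 0)) comp)
      ((members.insert (comp.getD zw 0) (bGet members (comp.getD zw 0) ++ bGet members (comp.getD zl 0))).erase (comp.getD zl 0)) := by
  have hw := comp.getD zw 0
  have hlen := fold_set_length (bGet members (comp.getD zl 0)) comp (comp.getD zw 0)
  have hchar := comp_char hB hzl (comp.getD zw 0)
  have hget : ∀ t, ((members.insert (comp.getD zw 0) (bGet members (comp.getD zw 0) ++ bGet members (comp.getD zl 0))).erase (comp.getD zl 0)).get? t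
      = if t = comp.getD zl 0 then none
        else if t = comp.getD zw 0 then some (bGet members (comp.getD zw 0) ++ bGet members (comp.getD zl 0))
        else members.get? t := by
    intro t
    rw [dict_get?_erase, PySem.Dict.get?_insert]
  refine ⟨?_, ?_, ?_, ?_⟩
  · intro u hu
    rw [hlen] at hu
    rw [hlen, hchar u hu]
    by_cases h : comp.getD u 0 = comp.getD zl 0
    · rw [if_pos h]; exact hB.1 zw hzw
    · rw [if_neg h]; exact hB.1 u hu
  · intro t lst hget'
    rw [hget t] at hget'
    by_cases h1 : t = comp.getD zl 0
    · rw [if_pos h1] at hget'; exact absurd hget' (by simp)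
    rw [if_neg h1] at hget'
    by_cases h2 : t = comp.getD zw 0
    · rw [if_pos h2] at hget'
      have hlst : lst = bGet members (comp.getD zw 0) ++ bGet members (comp.getD zl 0) := by
        injection hget' with hh; exact hh.symm
      intro i hi
      rw [hlst] at hi
      rcases List.mem_append.mp hi with hm | hm
      · obtain ⟨ha, hb, hc⟩ := bGet_nonneg hB hzw i hm
        refine ⟨ha, by rw [hlen]; exact hb, ?_⟩
        rw [hchar i.toNat hb, if_neg (by rw [hc]; exact hne), hc, h2]
      · obtain ⟨ha, hb, hc⟩ := bGet_nonneg hB hzl i hm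
        refine ⟨ha, by rw [hlen]; exact hb, ?_⟩
        rw [hchar i.toNat hb, if_pos hc, h2]
    · rw [if_neg h2] at hget'
      intro i hi
      obtain ⟨ha, hb, hc⟩ := hB.2.1 t lst hget' i hi
      refine ⟨ha, by rw [hlen]; exact hb, ?_⟩
      rw [hchar i.toNat hb, if_neg (by rw [hc]; exact h1), hc]
  · intro u hu lst hget'
    rw [hlen] at hu
    rw [hchar u hu] at hget'
    by_cases h : comp.getD u 0 = comp.getD zl 0
    · rw [if_pos h] at hget'
      rw [hget, if_neg hne, if_pos rfl] at hget'
      have hlst : lst = bGet members (comp.getD zw 0) ++ bGet members (comp.getD zl 0) := by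
        injection hget' with hh; exact hh.symm
      rw [hlst]
      exact List.mem_append.mpr (Or.inr ((bGet_mem hB hzl u hu).mpr h))
    · rw [if_neg h] at hget'
      rw [hget] at hget'
      by_cases h2 : comp.getD u 0 = comp.getD zw 0
      · rw [if_neg (by rw [h2]; exact fun hh => hne hh), if_pos h2] at hget'
        have hlst : lst = bGet members (comp.getD zw 0) ++ bGet members (comp.getD zl 0) := by
          injection hget' with hh; exact hh.symm
        rw [hlst]
        exact List.mem_append.mpr (Or.inl ((bGet_mem hB hzw u hu).mpr h2))
      · rw [if_neg (fun hh => h hh), if_neg h2] at hget'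
        exact hB.2.2.1 u hu lst hget'
  · intro u hu hnone
    rw [hlen] at hu
    rw [hchar u hu] at hnone ⊢
    by_cases h : comp.getD u 0 = comp.getD zl 0
    · rw [if_pos h] at hnone
      rw [hget, if_neg hne, if_pos rfl] at hnone
      exact absurd hnone (by simp)
    · rw [if_neg h] at hnone ⊢
      rw [hget, if_neg (fun hh => h hh)] at hnone
      by_cases h2 : comp.getD u 0 = comp.getD zw 0
      · rw [if_pos h2] at hnone; exact absurd hnone (by simp)
      · rw [if_neg h2] at hnone
        exact hB.2.2.2 u hu hnone

-- the purely propositional heart of the merge case: both sides identify the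
-- same two classes and leave everything else untouched
lemma merge_iff (a b rx ry R : Nat) (cu cv cx cy w l : Int)
    (hux : a = rx ↔ cu = cx) (huy : a = ry ↔ cu = cy)
    (hvx : b = rx ↔ cv = cx) (hvy : b = ry ↔ cv = cy)
    (huv : a = b ↔ cu = cv)
    (hR : R = rx ∨ R = ry)
    (hwl : (w = cx ∧ l = cy) ∨ (w = cy ∧ l = cx))
    (hwlne : w ≠ l) :
    ((if a = rx ∨ a = ry then R else a) = (if b = rx ∨ b = ry then R else b))
      ↔ ((if cu = l then w else cu) = (if cv = l then w else cv)) := by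
  have hval : ∀ c : Int, (c = cx ∨ c = cy) → (if c = l then w else c) = w := by
    intro c hc
    by_cases hcl : c = l
    · rw [if_pos hcl]
    · rw [if_neg hcl]
      rcases hwl with ⟨hw, hl⟩ | ⟨hw, hl⟩ <;> rcases hc with h | h <;> omega
  by_cases hA : a = rx ∨ a = ry <;> by_cases hB : b = rx ∨ b = ry
  · rw [if_pos hA, if_pos hB,
      hval cu (by rcases hA with h | h; exact Or.inl (hux.mp h); exact Or.inr (huy.mp h)),
      hval cv (by rcases hB with h | h; exact Or.inl (hvx.mp h); exact Or.inr (hvy.mp h))]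
    exact iff_of_true rfl rfl
  · rw [if_pos hA, if_neg hB,
      hval cu (by rcases hA with h | h; exact Or.inl (hux.mp h); exact Or.inr (huy.mp h))]
    push_neg at hB
    have hcv : (if cv = l then w else cv) = cv := by
      rw [if_neg (by rcases hwl with ⟨hw, hl⟩ | ⟨hw, hl⟩
                     · exact fun hh => hB.2 (hvy.mpr (by omega))
                     · exact fun hh => hB.1 (hvx.mpr (by omega)))]
    rw [hcv]
    constructor
    · intro h; exfalso; rcases hR with h3 | h3 <;> omega
    · intro h
      exfalso
      rcases hwl with ⟨hw, hl⟩ | ⟨hw, hl⟩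
      · exact hB.1 (hvx.mpr (by omega))
      · exact hB.2 (hvy.mpr (by omega))
  · rw [if_neg hA, if_pos hB,
      hval cv (by rcases hB with h | h; exact Or.inl (hvx.mp h); exact Or.inr (hvy.mp h))]
    push_neg at hA
    have hcu : (if cu = l then w else cu) = cu := by
      rw [if_neg (by rcases hwl with ⟨hw, hl⟩ | ⟨hw, hl⟩
                     · exact fun hh => hA.2 (huy.mpr (by omega))
                     · exact fun hh => hA.1 (hux.mpr (by omega)))]
    rw [hcu]
    constructor
    · intro h; exfalso; rcases hR with h3 | h3 <;> omega
    · intro h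
      exfalso
      rcases hwl with ⟨hw, hl⟩ | ⟨hw, hl⟩
      · exact hA.1 (hux.mpr (by omega))
      · exact hA.2 (huy.mpr (by omega))
  · rw [if_neg hA, if_neg hB]
    push_neg at hA
    push_neg at hB
    have hcu : (if cu = l then w else cu) = cu := by
      rw [if_neg (by rcases hwl with ⟨hw, hl⟩ | ⟨hw, hl⟩
                     · exact fun hh => hA.2 (huy.mpr (by omega))
                     · exact fun hh => hA.1 (hux.mpr (by omega)))]
    have hcv : (if cv = l then w else cv) = cv := by
      rw [if_neg (by rcases hwl with ⟨hw, hl⟩ | ⟨hw, hl⟩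
                     · exact fun hh => hB.2 (hvy.mpr (by omega))
                     · exact fun hh => hB.1 (hvx.mpr (by omega)))]
    rw [hcu, hcv]
    exact huv

-- the simulation invariant: comp labels carve out exactly the union-find classes
def InvAB (par : Array Int) (comp : List Int) : Prop :=
  GoodPar par ∧ comp.length = par.size ∧
  ∀ u v, u < par.size → v < par.size →
    (rootp par u = rootp par v ↔ comp.getD u 0 = comp.getD v 0)

lemma inner_sim (x : Int) :
    ∀ (ys : List Int) (par rank : Array Int) (comp : List Int)
      (members : PySem.Dict Int (List Int)) (res cx : Int),
      InvAB par comp → BInv comp members →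
      x.toNat < par.size →
      comp.getD x.toNat 0 = cx →
      (∀ y ∈ ys, 0 ≤ y ∧ y.toNat < par.size) →
      InvAB (aInner x ys (par, rank, res)).1 (bInner ys (cx, comp, members, res)).2.1 ∧
      BInv (bInner ys (cx, comp, members, res)).2.1 (bInner ys (cx, comp, members, res)).2.2.1 ∧
      (aInner x ys (par, rank, res)).1.size = par.size ∧
      (bInner ys (cx, comp, members, res)).2.1.getD x.toNat 0 = (bInner ys (cx, comp, members, res)).1 ∧
      (aInner x ys (par, rank, res)).2.2 = (bInner ys (cx, comp, members, res)).2.2.2 := by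
  intro ys
  induction ys with
  | nil =>
    intro par rank comp members res cx hInv hB hx hcx _
    exact ⟨hInv, hB, rfl, hcx, rfl⟩
  | cons y ys ih =>
    intro par rank comp members res cx hInv hB hx hcx hys
    subst hcx
    obtain ⟨hG, hlen, hrel⟩ := hInv
    obtain ⟨hy0, hyl⟩ := hys y (List.mem_cons_self ..)
    have hxl : x.toNat < comp.length := by rw [hlen]; exact hx
    have hyll : y.toNat < comp.length := by rw [hlen]; exact hyl
    obtain ⟨hv1, hsz1, hG1, hroots1⟩ := findF_spec par.size par x.toNat hG hx
      (reach_small hG hx)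
    have hy1 : y.toNat < (findF par.size par x.toNat).1.size := by rw [hsz1]; exact hyl
    obtain ⟨hv2, hsz2, hG2, hroots2⟩ := findF_spec (findF par.size par x.toNat).1.size
      (findF par.size par x.toNat).1 y.toNat hG1 hy1 (reach_small hG1 hy1)
    have hs21 : (findF (findF par.size par x.toNat).1.size (findF par.size par x.toNat).1 y.toNat).1.size = par.size := by
      rw [hsz2, hsz1]
    have hv2' : (findF (findF par.size par x.toNat).1.size (findF par.size par x.toNat).1 y.toNat).2
        = ((rootp par y.toNat : Nat) : Int) := by
      rw [hv2, hroots1 y.toNat hyl]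
    have hchain : ∀ u, u < par.size →
        rootp (findF (findF par.size par x.toNat).1.size (findF par.size par x.toNat).1 y.toNat).1 u
          = rootp par u := by
      intro u hu
      rw [hroots2 u (by rw [hsz1]; exact hu), hroots1 u hu]
    simp only [aInner, bInner]
    have hcond : ((findF par.size par x.toNat).2 ≠ (findF (findF par.size par x.toNat).1.size (findF par.size par x.toNat).1 y.toNat).2)
        ↔ ¬ (comp.getD y.toNat 0 = comp.getD x.toNat 0) := by
      rw [hv1, hv2', ne_eq, Int.natCast_inj,
        (hrel x.toNat y.toNat hx hyl).trans eq_comm]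
    by_cases hC : comp.getD y.toNat 0 = comp.getD x.toNat 0
    · rw [if_neg (fun h => hcond.mp h hC), if_neg (fun h => h hC)]
      have hInv2 : InvAB (findF (findF par.size par x.toNat).1.size (findF par.size par x.toNat).1 y.toNat).1 comp := by
        refine ⟨hG2, by rw [hs21]; exact hlen, ?_⟩
        intro u v hu hv
        rw [hs21] at hu hv
        rw [hchain u hu, hchain v hv]
        exact hrel u v hu hv
      obtain ⟨hI, hBI, hszI, hcxI, hresI⟩ := ih
        (findF (findF par.size par x.toNat).1.size (findF par.size par x.toNat).1 y.toNat).1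
        rank comp members res (comp.getD x.toNat 0) hInv2 hB (by rw [hs21]; exact hx) rfl
        (fun z hz => ⟨(hys z (List.mem_cons_of_mem _ hz)).1,
          by rw [hs21]; exact (hys z (List.mem_cons_of_mem _ hz)).2⟩)
      exact ⟨hI, hBI, by rw [hszI, hs21], hcxI, hresI⟩
    · rw [if_pos (hcond.mpr hC), if_pos hC]
      have hxy : rootp par x.toNat ≠ rootp par y.toNat := by
        intro h
        exact hC ((hrel x.toNat y.toNat hx hyl).mp h).symm
      have hneq : rootp (findF (findF par.size par x.toNat).1.size (findF par.size par x.toNat).1 y.toNat).1 x.toNat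
          ≠ rootp (findF (findF par.size par x.toNat).1.size (findF par.size par x.toNat).1 y.toNat).1 y.toNat := by
        rw [hchain x.toNat hx, hchain y.toNat hyl]; exact hxy
      obtain ⟨hszU, hGU, R, hR, hrootsU⟩ := unionF_spec
        (findF (findF par.size par x.toNat).1.size (findF par.size par x.toNat).1 y.toNat).1
        rank x.toNat y.toNat hG2 (by rw [hs21]; exact hx) (by rw [hs21]; exact hyl) hneq
      have hszU' : (unionF (findF (findF par.size par x.toNat).1.size (findF par.size par x.toNat).1 y.toNat).1 rank x.toNat y.toNat).1.size = par.size := by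
        rw [hszU, hs21]
      have hR' : R = rootp par x.toNat ∨ R = rootp par y.toNat := by
        rw [hchain x.toNat hx, hchain y.toNat hyl] at hR; exact hR
      have hrootsU' : ∀ u, u < par.size →
          rootp (unionF (findF (findF par.size par x.toNat).1.size (findF par.size par x.toNat).1 y.toNat).1 rank x.toNat y.toNat).1 u
            = if rootp par u = rootp par x.toNat ∨ rootp par u = rootp par y.toNat then R
              else rootp par u := by
        intro u hu
        rw [hrootsU u (by rw [hs21]; exact hu), hchain u hu, hchain x.toNat hx, hchain y.toNat hyl]
      by_cases hsw : (bGet members (comp.getD x.toNat 0)).length < (bGet members (comp.getD y.toNat 0)).length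
      · simp only [if_pos hsw]
        -- x's class loses its label: w = comp[y], l = comp[x]
        have hBI' := BInv_merge hB hyll hxl (fun h => hC h)
        have hchr := comp_char hB hxl (comp.getD y.toNat 0)
        have hlen' := fold_set_length (bGet members (comp.getD x.toNat 0)) comp (comp.getD y.toNat 0)
        have hInvU : InvAB
            (unionF (findF (findF par.size par x.toNat).1.size (findF par.size par x.toNat).1 y.toNat).1 rank x.toNat y.toNat).1
            ((bGet members (comp.getD x.toNat 0)).foldl (fun c idx => c.set idx.toNat (comp.getD y.toNat 0)) comp) := by
          refine ⟨hGU, by rw [hlen', hszU']; exact hlen, ?_⟩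
          intro u v hu hv
          rw [hszU'] at hu hv
          rw [hrootsU' u hu, hrootsU' v hv,
            hchr u (by rw [hlen]; exact hu), hchr v (by rw [hlen]; exact hv)]
          exact merge_iff (rootp par u) (rootp par v) (rootp par x.toNat) (rootp par y.toNat) R
            (comp.getD u 0) (comp.getD v 0) (comp.getD x.toNat 0) (comp.getD y.toNat 0)
            (comp.getD y.toNat 0) (comp.getD x.toNat 0)
            (hrel u x.toNat hu hx) (hrel u y.toNat hu hyl)
            (hrel v x.toNat hv hx) (hrel v y.toNat hv hyl)
            (hrel u v hu hv) hR' (Or.inr ⟨rfl, rfl⟩) (fun h => hC h)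
        have hcx' : ((bGet members (comp.getD x.toNat 0)).foldl (fun c idx => c.set idx.toNat (comp.getD y.toNat 0)) comp).getD x.toNat 0
            = comp.getD y.toNat 0 := by
          rw [hchr x.toNat hxl, if_pos rfl]
        obtain ⟨hI, hBI2, hszI, hcxI, hresI⟩ := ih
          (unionF (findF (findF par.size par x.toNat).1.size (findF par.size par x.toNat).1 y.toNat).1 rank x.toNat y.toNat).1
          (unionF (findF (findF par.size par x.toNat).1.size (findF par.size par x.toNat).1 y.toNat).1 rank x.toNat y.toNat).2
          ((bGet members (comp.getD x.toNat 0)).foldl (fun c idx => c.set idx.toNat (comp.getD y.toNat 0)) comp)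
          ((members.insert (comp.getD y.toNat 0) (bGet members (comp.getD y.toNat 0) ++ bGet members (comp.getD x.toNat 0))).erase (comp.getD x.toNat 0))
          (res - 1) (comp.getD y.toNat 0) hInvU hBI' (by rw [hszU']; exact hx) hcx'
          (fun z hz => ⟨(hys z (List.mem_cons_of_mem _ hz)).1,
            by rw [hszU']; exact (hys z (List.mem_cons_of_mem _ hz)).2⟩)
        exact ⟨hI, hBI2, by rw [hszI, hszU'], hcxI, hresI⟩
      · simp only [if_neg hsw]
        -- y's class loses its label: w = comp[x], l = comp[y]
        have hBI' := BInv_merge hB hxl hyll (fun h => hC h.symm)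
        have hchr := comp_char hB hyll (comp.getD x.toNat 0)
        have hlen' := fold_set_length (bGet members (comp.getD y.toNat 0)) comp (comp.getD x.toNat 0)
        have hInvU : InvAB
            (unionF (findF (findF par.size par x.toNat).1.size (findF par.size par x.toNat).1 y.toNat).1 rank x.toNat y.toNat).1
            ((bGet members (comp.getD y.toNat 0)).foldl (fun c idx => c.set idx.toNat (comp.getD x.toNat 0)) comp) := by
          refine ⟨hGU, by rw [hlen', hszU']; exact hlen, ?_⟩
          intro u v hu hv
          rw [hszU'] at hu hv
          rw [hrootsU' u hu, hrootsU' v hv,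
            hchr u (by rw [hlen]; exact hu), hchr v (by rw [hlen]; exact hv)]
          exact merge_iff (rootp par u) (rootp par v) (rootp par x.toNat) (rootp par y.toNat) R
            (comp.getD u 0) (comp.getD v 0) (comp.getD x.toNat 0) (comp.getD y.toNat 0)
            (comp.getD x.toNat 0) (comp.getD y.toNat 0)
            (hrel u x.toNat hu hx) (hrel u y.toNat hu hyl)
            (hrel v x.toNat hv hx) (hrel v y.toNat hv hyl)
            (hrel u v hu hv) hR' (Or.inl ⟨rfl, rfl⟩) (fun h => hC h.symm)
        have hcx' : ((bGet members (comp.getD y.toNat 0)).foldl (fun c idx => c.set idx.toNat (comp.getD x.toNat 0)) comp).getD x.toNat 0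
            = comp.getD x.toNat 0 := by
          rw [hchr x.toNat hxl, if_neg (fun h => hC h.symm)]
        obtain ⟨hI, hBI2, hszI, hcxI, hresI⟩ := ih
          (unionF (findF (findF par.size par x.toNat).1.size (findF par.size par x.toNat).1 y.toNat).1 rank x.toNat y.toNat).1
          (unionF (findF (findF par.size par x.toNat).1.size (findF par.size par x.toNat).1 y.toNat).1 rank x.toNat y.toNat).2
          ((bGet members (comp.getD y.toNat 0)).foldl (fun c idx => c.set idx.toNat (comp.getD x.toNat 0)) comp)
          ((members.insert (comp.getD x.toNat 0) (bGet members (comp.getD x.toNat 0) ++ bGet members (comp.getD y.toNat 0))).erase (comp.getD y.toNat 0))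
          (res - 1) (comp.getD x.toNat 0) hInvU hBI' (by rw [hszU']; exact hx) hcx'
          (fun z hz => ⟨(hys z (List.mem_cons_of_mem _ hz)).1,
            by rw [hszU']; exact (hys z (List.mem_cons_of_mem _ hz)).2⟩)
        exact ⟨hI, hBI2, by rw [hszI, hszU'], hcxI, hresI⟩

lemma pyRange_cons_of_pos (a b s : Int) (hs : 0 < s) (hab : a < b) :
    PySem.List.pyRange a b s = a :: PySem.List.pyRange (a + s) b s := by
  rw [PySem.List.pyRange_of_pos _ _ hs, PySem.List.pyRange_of_pos _ _ hs]
  have hnum : 0 ≤ (b - (a + s) + s - 1) / s := Int.ediv_nonneg (by omega) (by omega)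
  have hcount : (if a < b then ((b - a + s - 1) / s).toNat else 0)
      = (if a + s < b then ((b - (a + s) + s - 1) / s).toNat else 0) + 1 := by
    rw [if_pos hab]
    by_cases h2 : a + s < b
    · rw [if_pos h2]
      have h3 : b - a + s - 1 = (b - (a + s) + s - 1) + 1 * s := by ring
      rw [h3, Int.add_mul_ediv_right _ _ (by omega : s ≠ 0)]
      omega
    · rw [if_neg h2]
      have h3 : b - a + s - 1 = (b - a - 1) + 1 * s := by ring
      rw [h3, Int.add_mul_ediv_right _ _ (by omega : s ≠ 0)]
      have h4 : (b - a - 1) / s = 0 := Int.ediv_eq_zero_of_lt (by omega) (by omega)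
      omega
  rw [hcount, List.range_succ_eq_map, List.map_cons, List.map_map]
  congr 1
  · simp
  · apply List.map_congr_left
    intro k _
    simp only [Function.comp_apply, Nat.succ_eq_add_one]
    push_cast
    ring


lemma getPrimes_two_le (N : Int) : ∀ q ∈ getPrimes N, 2 ≤ q := by
  intro q hq
  simp only [getPrimes] at hq
  have main : ∀ (l : List Int) (st : Array Bool × Array Int),
      (∀ t ∈ st.2.toList, 2 ≤ t) → (∀ i ∈ l, 2 ≤ i) →
      ∀ t ∈ (l.foldl (getPrimesStep N) st).2.toList, 2 ≤ t := by
    intro l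
    induction l with
    | nil => intro st h _ t ht; exact h t ht
    | cons i l ih =>
      intro st h hl t ht
      rw [List.foldl_cons] at ht
      refine ih _ ?_ (fun j hj => hl j (List.mem_cons_of_mem _ hj)) t ht
      intro u hu
      unfold getPrimesStep at hu
      by_cases hc : st.1.getD i.toNat false = true
      · rw [if_pos hc] at hu
        simp only [Array.toList_push] at hu
        rcases List.mem_append.mp hu with h1 | h1
        · exact h u h1
        · have : u = i := by simpa using h1
          rw [this]; exact hl i (List.mem_cons_self ..)
      · rw [if_neg hc] at hu; exact h u hu
  refine main _ _ (by simp) (fun i hi => ?_) q hq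
  exact (PySem.List.mem_pyRange_one.mp hi).1


lemma primes_sim (Av P n : Int) :
    ∀ (ps : List Int), (∀ p ∈ ps, 2 ≤ p) →
    ∀ (par rank : Array Int) (comp : List Int) (members : PySem.Dict Int (List Int)) (res : Int),
      InvAB par comp → BInv comp members → par.size = n.toNat →
      (aPrimes Av P n ps (par, rank, res)).2.2 = (bPrimes Av P n ps (comp, members, res)).2.2 := by
  intro ps
  induction ps with
  | nil =>
    intro _ par rank comp members res _ _ _
    rfl
  | cons p ps ih =>
    intro hps par rank comp members res hInv hB hsz
    have hp2 : 2 ≤ p := hps p (List.mem_cons_self ..)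
    have hps' : ∀ q ∈ ps, 2 ≤ q := fun q hq => hps q (List.mem_cons_of_mem _ hq)
    simp only [aPrimes, bPrimes]
    by_cases h1 : p ≥ n
    · rw [if_pos h1, if_pos h1]
    · rw [if_neg h1, if_neg h1]
      by_cases h2 : p ≥ P
      swap
      · rw [if_neg h2, if_neg h2]
        exact ih hps' par rank comp members res hInv hB hsz
      rw [if_pos h2, if_pos h2]
      have hpn : p < n := by omega
      have hm := PySem.Int.floordiv_mul_add_mod Av p
      have hm0 := PySem.Int.mod_nonneg Av (by omega : (0:Int) < p)
      have hml := PySem.Int.mod_lt Av (by omega : (0:Int) < p)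
      have hxb : 0 ≤ (if PySem.Int.floordiv Av p * p < Av then PySem.Int.floordiv Av p * p + p else PySem.Int.floordiv Av p * p) - Av ∧
          (if PySem.Int.floordiv Av p * p < Av then PySem.Int.floordiv Av p * p + p else PySem.Int.floordiv Av p * p) - Av < p := by
        by_cases hc : PySem.Int.floordiv Av p * p < Av
        · rw [if_pos hc]; omega
        · rw [if_neg hc]; omega
      set xv := (if PySem.Int.floordiv Av p * p < Av then PySem.Int.floordiv Av p * p + p else PySem.Int.floordiv Av p * p) - Av with hxv
      have hxn : xv < n := by omega
      have hxt : xv.toNat < n.toNat := by omega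
      have hxs : xv.toNat < par.size := by omega
      rw [pyRange_cons_of_pos xv n p (by omega) (by omega)]
      obtain ⟨hG, hlen, hrel⟩ := hInv
      simp only [aInner]
      obtain ⟨hv1, hsz1, hG1, hroots1⟩ := findF_spec par.size par xv.toNat hG hxs
        (reach_small hG hxs)
      have hx1 : xv.toNat < (findF par.size par xv.toNat).1.size := by rw [hsz1]; exact hxs
      obtain ⟨hv2, hsz2, hG2, hroots2⟩ := findF_spec (findF par.size par xv.toNat).1.size
        (findF par.size par xv.toNat).1 xv.toNat hG1 hx1 (reach_small hG1 hx1)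
      have hv2' : (findF (findF par.size par xv.toNat).1.size (findF par.size par xv.toNat).1 xv.toNat).2
          = ((rootp par xv.toNat : Nat) : Int) := by
        rw [hv2, hroots1 xv.toNat hxs]
      have hs21 : (findF (findF par.size par xv.toNat).1.size (findF par.size par xv.toNat).1 xv.toNat).1.size = par.size := by
        rw [hsz2, hsz1]
      rw [if_neg (by rw [hv1, hv2']; exact fun h => h rfl)]
      have hInv2 : InvAB (findF (findF par.size par xv.toNat).1.size (findF par.size par xv.toNat).1 xv.toNat).1 comp := by
        refine ⟨hG2, by rw [hs21]; exact hlen, ?_⟩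
        intro u v hu hv
        rw [hs21] at hu hv
        rw [hroots2 u (by rw [hsz1]; exact hu), hroots2 v (by rw [hsz1]; exact hv),
          hroots1 u hu, hroots1 v hv]
        exact hrel u v hu hv
      obtain ⟨hI, hBI, hszI, hcxI, hresI⟩ := inner_sim xv
        (PySem.List.pyRange (xv + p) n p)
        (findF (findF par.size par xv.toNat).1.size (findF par.size par xv.toNat).1 xv.toNat).1
        rank comp members res (comp.getD xv.toNat 0) hInv2 hB (by rw [hs21]; exact hxs) rfl
        (by
          intro z hz
          obtain ⟨hz1, hz2, _⟩ := (PySem.List.mem_pyRange_iff_of_pos (by omega : (0:Int) < p) z).mp hz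
          exact ⟨by omega, by rw [hs21]; omega⟩)
      set stA := aInner xv (PySem.List.pyRange (xv + p) n p)
        ((findF (findF par.size par xv.toNat).1.size (findF par.size par xv.toNat).1 xv.toNat).1, rank, res) with hstA
      set stB := bInner (PySem.List.pyRange (xv + p) n p) (comp.getD xv.toNat 0, comp, members, res) with hstB
      have heA : stA = (stA.1, stA.2.1, stA.2.2) := rfl
      have heB : stB.2 = (stB.2.1, stB.2.2.1, stA.2.2) := by
        rw [hresI]
      rw [heA, heB]
      exact ih hps' stA.1 stA.2.1 stB.2.1 stB.2.2.1 stA.2.2 hI hBI (by rw [hszI, hs21]; exact hsz)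

lemma init_get (n : Int) (u : Nat) (hu : u < n.toNat) :
    (((List.range n.toNat).map (fun i => Int.ofNat i)).toArray).getD u 0 = (u : Int) := by
  rw [Array.getD_eq_getD_getElem?, List.getElem?_toArray, List.getElem?_map,
    List.getElem?_range hu]
  rfl

lemma init_comp_get (n : Int) (u : Nat) (hu : u < n.toNat) :
    ((List.range n.toNat).map (fun i => Int.ofNat i)).getD u 0 = (u : Int) := by
  rw [List.getD_eq_getElem?_getD, List.getElem?_map, List.getElem?_range hu]
  rfl

lemma init_inv (n : Int) :
    InvAB (((List.range n.toNat).map (fun i => Int.ofNat i)).toArray)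
      ((List.range n.toNat).map (fun i => Int.ofNat i)) := by
  have hsz : (((List.range n.toNat).map (fun i => Int.ofNat i)).toArray).size = n.toNat := by
    rw [List.size_toArray, List.length_map, List.length_range]
  have hroot : ∀ u, u < n.toNat →
      IsRootP (((List.range n.toNat).map (fun i => Int.ofNat i)).toArray) u := by
    intro u hu; unfold IsRootP; rw [init_get n u hu]
  refine ⟨⟨?_, ?_⟩, ?_, ?_⟩
  · intro i hi
    rw [hsz] at hi
    rw [init_get n i hi]
    constructor
    · exact Int.natCast_nonneg i
    · rw [Int.toNat_natCast, hsz]; exact hi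
  · intro i hi
    rw [hsz] at hi
    exact ⟨0, hroot i hi⟩
  · rw [List.length_map, List.length_range, hsz]
  · intro u v hu hv
    rw [hsz] at hu hv
    rw [rootp_of_root (hroot u hu), rootp_of_root (hroot v hv),
      init_comp_get n u hu, init_comp_get n v hv]
    exact ⟨fun h => by rw [h], fun h => by exact_mod_cast h⟩

lemma init_binv (n : Int) :
    BInv ((List.range n.toNat).map (fun i => Int.ofNat i)) PySem.Dict.empty := by
  have hlen : ((List.range n.toNat).map (fun i => Int.ofNat i)).length = n.toNat := by
    rw [List.length_map, List.length_range]
  refine ⟨?_, ?_, ?_, ?_⟩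
  · intro u hu
    rw [hlen] at hu
    rw [init_comp_get n u hu]
    exact ⟨Int.natCast_nonneg u, by rw [Int.toNat_natCast, hlen]; exact hu⟩
  · intro l lst h
    rw [PySem.Dict.get?_empty] at h
    exact absurd h (by simp)
  · intro u hu lst h
    rw [PySem.Dict.get?_empty] at h
    exact absurd h (by simp)
  · intro u hu _
    rw [hlen] at hu
    rw [init_comp_get n u hu]

-- ===== VERDICT (by name: the statement is the Claim_ definition above) =====
theorem solve_spec : Claim_equal_solve := by
  unfold Claim_equal_solve
  intro A B P _
  unfold Spec_solve
  simp only [solve, solve_alt]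
  exact congrArg PySem.Int.toStr
    (primes_sim A P (B - A + 1) (getPrimes 1000000) (getPrimes_two_le 1000000)
      (((List.range (B - A + 1).toNat).map (fun i => Int.ofNat i)).toArray)
      (Array.replicate (B - A + 1).toNat 0)
      ((List.range (B - A + 1).toNat).map (fun i => Int.ofNat i))
      PySem.Dict.empty
      (B - A + 1) (init_inv (B - A + 1)) (init_binv (B - A + 1))
      (by rw [List.size_toArray, List.length_map, List.length_range]))
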